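-- pv_equiv track=rewrite | github.com/qiburger/Natural-Language-Processing | labeling.py | create_feature_space
-- ===== SOURCE A (Python) =====
-- def create_feature_space(list):
--     feature_space = {}
--     count = 0
--     for words in list:
--             if words not in feature_space:
--                 feature_space[words] = count
--                 count += 1
--     return feature_space
-- ===== SOURCE B (Python) =====
-- def create_feature_space(list):
--     # Walk the list backwards, overwriting, so each word ends up mapped to its
--     # FIRST occurrence index; then sort the unique words by that index and number them.
--     first = {}
--     for i, w in reversed([(i, w) for i, w in enumerate(list)]):
--         first[w] = i
--     return {w: j for j, w in enumerate(sorted(first, key=first.get))}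
-- ===== Notes on version B (the rewrite author's own statement) =====
-- stated objective: alternative
-- what changed: Replaces A's single forward pass with a seen-set membership guard and a manual counter by a different algorithm: a backward overwrite pass that records each word's first-occurrence index with no membership test, followed by a sort of the unique words by that index and a numbering pass.
import Mathlib
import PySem

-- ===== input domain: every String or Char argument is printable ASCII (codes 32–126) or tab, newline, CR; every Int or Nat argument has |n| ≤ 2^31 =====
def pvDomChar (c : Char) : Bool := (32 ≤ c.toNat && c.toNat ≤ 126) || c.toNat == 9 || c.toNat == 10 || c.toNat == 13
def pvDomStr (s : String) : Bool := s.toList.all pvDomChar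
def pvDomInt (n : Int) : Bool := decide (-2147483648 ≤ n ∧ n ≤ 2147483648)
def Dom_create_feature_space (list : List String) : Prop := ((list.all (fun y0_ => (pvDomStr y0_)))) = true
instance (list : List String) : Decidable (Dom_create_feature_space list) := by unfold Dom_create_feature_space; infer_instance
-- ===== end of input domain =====

-- B replaces A's guarded single pass with a backward overwrite pass recording first-occurrence
-- indices, then a sort of the unique words by that index and a numbering pass (alternative algorithm, similar cost).

-- ===== PORT A =====
-- A: loop over the words, inserting unseen ones into the dict with the running counter.
def create_feature_space (list : List String) : List (String × Int) :=
  (list.foldl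
    (fun (st : PySem.Dict String Int × Int) words =>
      if st.1.contains words then st else (st.1.insert words st.2, st.2 + 1))
    (PySem.Dict.empty, 0)).1.items

-- ===== PORT B =====
-- B: backward pass over enumerate(list) overwriting first[w] = i (so the first occurrence wins),
-- then sorted(first, key=first.get) — every key is present, so first.get w = getD w 0 — then enumerate.
def create_feature_space_alt (list : List String) : List (String × Int) :=
  let first : PySem.Dict String Int :=
    ((PySem.List.enumerate list 0).reverse).foldl (fun d p => d.insert p.2 p.1) PySem.Dict.empty
  let order := PySem.List.sorted first.keys (fun w => first.getD w 0) false
  (PySem.List.enumerate order 0).map (fun p => (p.2, p.1))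

-- ===== PRECONDITION & SPEC =====
def Spec_create_feature_space (list : List String) (out : List (String × Int)) : Prop := out = create_feature_space_alt list
instance (list : List String) (out : List (String × Int)) : Decidable (Spec_create_feature_space list out) := by unfold Spec_create_feature_space; infer_instance

-- ===== CLAIM (what is proved, stated in full; the proofs are below) =====
def Claim_equal_create_feature_space : Prop := ∀ (list : List String), Dom_create_feature_space list → Spec_create_feature_space list (create_feature_space list)

-- ===== LEMMAS AND PROOFS =====

-- The keys A's loop will freshly add, in order, starting from already-seen keys `ks`.
def pvFresh (ks : List String) : List String → List String
  | [] => []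
  | w :: t => if w ∈ ks then pvFresh ks t else w :: pvFresh (ks ++ [w]) t

theorem pvSet_update_eq_fresh (l ks : List String) :
    PySem.Set.update ks l = ks ++ pvFresh ks l := by
  induction l generalizing ks with
  | nil => simp [PySem.Set.update, pvFresh]
  | cons w t ih =>
    simp only [PySem.Set.update, List.foldl_cons] at *
    by_cases hw : w ∈ ks
    · have ha : PySem.Set.add ks w = ks := by simp [PySem.Set.add, PySem.Set.contains, hw]
      rw [ha, ih, pvFresh, if_pos hw]
    · have ha : PySem.Set.add ks w = ks ++ [w] := by simp [PySem.Set.add, PySem.Set.contains, hw]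
      rw [ha, ih, pvFresh, if_neg hw]
      simp

theorem pvFresh_nil_eq_dedup (l : List String) :
    pvFresh [] l = PySem.List.dedup l := by
  have := pvSet_update_eq_fresh l []
  simpa [PySem.List.dedup_eq_ofList, PySem.Set.ofList_eq_foldl, PySem.Set.update] using this.symm

-- Loop invariant for A's fold: the dict grows by the fresh keys, numbered from the counter.
theorem pvLoop_items (l : List String) (d : PySem.Dict String Int) (c : Int)
    (hnd : d.keys.Nodup) :
    (l.foldl
      (fun (st : PySem.Dict String Int × Int) words =>
        if st.1.contains words then st else (st.1.insert words st.2, st.2 + 1))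
      (d, c)).1.items
    = d.items ++ (PySem.List.enumerate (pvFresh d.keys l) c).map (fun p => (p.2, p.1)) := by
  induction l generalizing d c with
  | nil => simp [pvFresh]
  | cons w t ih =>
    by_cases hw : w ∈ d.keys
    · have hc : d.contains w = true := (PySem.Dict.contains_iff_mem_keys d w).2 hw
      simp only [List.foldl_cons, hc, if_true, pvFresh, if_pos hw]
      exact ih d c hnd
    · have hc : d.contains w = false := by
        rw [Bool.eq_false_iff]
        intro h
        exact hw ((PySem.Dict.contains_iff_mem_keys d w).1 h)
      simp only [List.foldl_cons, hc, Bool.false_eq_true, if_false, pvFresh, if_neg hw]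
      rw [ih (d.insert w c) (c + 1)
            (by rw [PySem.Dict.keys_insert_of_not_contains d c hc]; simp [List.nodup_append, hnd]; exact fun a ha he => hw (he ▸ ha))]
      rw [PySem.Dict.items_insert_of_not_contains d c hc,
          PySem.Dict.keys_insert_of_not_contains d c hc,
          PySem.List.enumerate_cons]
      simp

-- pvFresh only looks at membership of the seen set.
theorem pvFresh_congr (t : List String) (ks ks' : List String)
    (h : ∀ x, x ∈ ks ↔ x ∈ ks') : pvFresh ks t = pvFresh ks' t := by
  induction t generalizing ks ks' with
  | nil => simp [pvFresh]
  | cons w t ih =>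
    by_cases hw : w ∈ ks
    · rw [pvFresh, if_pos hw, pvFresh, if_pos ((h w).1 hw)]
      exact ih ks ks' h
    · rw [pvFresh, if_neg hw, pvFresh, if_neg (fun hx => hw ((h w).2 hx))]
      refine congrArg _ (ih _ _ ?_)
      intro x; simp [h x]

-- Marking w as seen is the same as deleting w from the rest of the input.
theorem pvFresh_snoc (t : List String) (ks : List String) (w : String) :
    pvFresh (ks ++ [w]) t = pvFresh ks (t.filter (fun x => x != w)) := by
  induction t generalizing ks with
  | nil => simp [pvFresh]
  | cons x t ih =>
    by_cases hxw : x = w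
    · subst hxw
      have : (x :: t).filter (fun y => y != x) = t.filter (fun y => y != x) := by simp
      rw [this, pvFresh, if_pos (by simp), ih]
    · have : (x :: t).filter (fun y => y != w) = x :: t.filter (fun y => y != w) := by simp [hxw]
      rw [this]
      by_cases hx : x ∈ ks
      · rw [pvFresh, if_pos (by simp [hx]), pvFresh, if_pos hx, ih]
      · rw [pvFresh, if_neg (by simp [hx, hxw]), pvFresh, if_neg hx]
        refine congrArg _ ?_
        rw [pvFresh_congr t (ks ++ [w] ++ [x]) (ks ++ [x] ++ [w]) (by intro y; simp; tauto), ih]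

-- Structural characterisation of Python's ordered dedup.
theorem pvDedup_cons (w : String) (t : List String) :
    PySem.List.dedup (w :: t) = w :: PySem.List.dedup (t.filter (fun x => x != w)) := by
  rw [← pvFresh_nil_eq_dedup, ← pvFresh_nil_eq_dedup, pvFresh, if_neg (by simp)]
  refine congrArg _ ?_
  simpa using pvFresh_snoc t [] w

-- Filtering preserves the relative order of first occurrences.
theorem pvIdxOf_filter_mono (p : String → Bool) (l : List String) (a b : String)
    (ha : a ∈ l.filter p) (hb : b ∈ l.filter p)
    (h : (l.filter p).idxOf a < (l.filter p).idxOf b) : l.idxOf a < l.idxOf b := by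
  induction l with
  | nil => simp at ha
  | cons x t ih =>
    by_cases hpx : p x
    · have hf : (x :: t).filter p = x :: t.filter p := by simp [hpx]
      rw [hf] at ha hb h
      by_cases hax : x = a
      · subst hax
        by_cases hbx : x = b
        · subst hbx; simp at h
        · have : (x :: t).idxOf b = t.idxOf b + 1 := by simp [List.idxOf_cons, hbx]
          simp [this]
      · by_cases hbx : x = b
        · subst hbx
          have h1 : (x :: t.filter p).idxOf a = (t.filter p).idxOf a + 1 := by
            simp [List.idxOf_cons, hax]
          simp [h1] at h
        · have h1 : (x :: t.filter p).idxOf a = (t.filter p).idxOf a + 1 := by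
            simp [List.idxOf_cons, hax]
          have h2 : (x :: t.filter p).idxOf b = (t.filter p).idxOf b + 1 := by
            simp [List.idxOf_cons, hbx]
          rw [h1, h2] at h
          have ha' : a ∈ t.filter p := by
            rcases List.mem_cons.1 ha with h' | h' ; · exact absurd h'.symm hax
            exact h'
          have hb' : b ∈ t.filter p := by
            rcases List.mem_cons.1 hb with h' | h' ; · exact absurd h'.symm hbx
            exact h'
          have := ih ha' hb' (by omega)
          have g1 : (x :: t).idxOf a = t.idxOf a + 1 := by simp [List.idxOf_cons, hax]
          have g2 : (x :: t).idxOf b = t.idxOf b + 1 := by simp [List.idxOf_cons, hbx]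
          omega
    · have hf : (x :: t).filter p = t.filter p := by simp [hpx]
      rw [hf] at ha hb h
      have hax : x ≠ a := fun he => hpx (he ▸ (List.mem_filter.1 ha).2)
      have hbx : x ≠ b := fun he => hpx (he ▸ (List.mem_filter.1 hb).2)
      have := ih ha hb h
      have g1 : (x :: t).idxOf a = t.idxOf a + 1 := by simp [List.idxOf_cons, hax]
      have g2 : (x :: t).idxOf b = t.idxOf b + 1 := by simp [List.idxOf_cons, hbx]
      omega

-- The deduplicated list is strictly ordered by first-occurrence index.
theorem pvDedup_pairwise_aux : ∀ (n : Nat) (l : List String), l.length ≤ n →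
    (PySem.List.dedup l).Pairwise (fun a b => l.idxOf a < l.idxOf b) := by
  intro n
  induction n with
  | zero =>
    intro l hl
    have : l = [] := List.eq_nil_of_length_eq_zero (Nat.le_zero.1 hl)
    subst this; simp
  | succ n ih =>
    intro l hl
    cases l with
    | nil => simp
    | cons w t =>
      rw [pvDedup_cons]
      refine List.Pairwise.cons ?_ ?_
      · intro b hb
        have hbf : b ∈ t.filter (fun x => x != w) := (PySem.List.mem_dedup _ _).1 hb
        have hbw : b ≠ w := by simpa using (List.mem_filter.1 hbf).2
        have : (w :: t).idxOf b = t.idxOf b + 1 := by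
          simp [List.idxOf_cons, Ne.symm hbw]
        simp [this]
      · have hlen : (t.filter (fun x => x != w)).length ≤ n := by
          have := List.length_filter_le (fun x => x != w) t
          simp at hl; omega
        have hp := ih (t.filter (fun x => x != w)) hlen
        refine List.Pairwise.imp_of_mem ?_ hp
        intro a b hA hB hab
        have haf := (PySem.List.mem_dedup _ _).1 hA
        have hbf := (PySem.List.mem_dedup _ _).1 hB
        have h1 := pvIdxOf_filter_mono (fun x => x != w) t a b haf hbf hab
        have haw : a ≠ w := by simpa using (List.mem_filter.1 haf).2
        have hbw : b ≠ w := by simpa using (List.mem_filter.1 hbf).2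
        have g1 : (w :: t).idxOf a = t.idxOf a + 1 := by
          simp [List.idxOf_cons, Ne.symm haw]
        have g2 : (w :: t).idxOf b = t.idxOf b + 1 := by
          simp [List.idxOf_cons, Ne.symm hbw]
        omega

theorem pvDedup_pairwise (l : List String) :
    (PySem.List.dedup l).Pairwise (fun a b => l.idxOf a < l.idxOf b) :=
  pvDedup_pairwise_aux l.length l (le_refl _)

-- B's first-pass dict, named for the proofs (definitionally B's `first`).
def pvFirst (l : List String) : PySem.Dict String Int :=
  ((PySem.List.enumerate l 0).reverse).foldl (fun d p => d.insert p.2 p.1) PySem.Dict.empty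

-- A fold of inserts over a REVERSED pair list looks up like find? on the unreversed list.
theorem pvRevFold_get (qs : List (Int × String)) (d : PySem.Dict String Int) (w : String) :
    (qs.reverse.foldl (fun d (p : Int × String) => d.insert p.2 p.1) d).get? w
      = (match qs.find? (fun p => p.2 == w) with
         | some p => some p.1
         | none => d.get? w) := by
  induction qs with
  | nil => rfl
  | cons x qs ih =>
    rw [List.reverse_cons, List.foldl_append]
    simp only [List.foldl_cons, List.foldl_nil]
    rw [PySem.Dict.get?_insert]
    rw [List.find?_cons]
    by_cases hx : x.2 = w
    · simp [hx]
    · have : (x.2 == w) = false := by simp [hx]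
      simp only [this, if_neg (fun he : w = x.2 => hx he.symm)]
      exact ih

theorem pvFind_enumerate (l : List String) (w : String) :
    ∀ s : Int, w ∈ l →
      (PySem.List.enumerate l s).find? (fun p => p.2 == w)
        = some (s + (l.idxOf w : Int), w) := by
  induction l with
  | nil => intro s h; simp at h
  | cons x t ih =>
    intro s hw
    rw [PySem.List.enumerate_cons, List.find?_cons]
    by_cases hx : x = w
    · subst hx; simp
    · have hbeq : (x == w) = false := by simp [hx]
      have hwt : w ∈ t := by rcases List.mem_cons.1 hw with h | h; · exact absurd h.symm hx
                             exact h
      have hidx : (x :: t).idxOf w = t.idxOf w + 1 := by simp [List.idxOf_cons, hx]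
      rw [hbeq]
      simp only [cond_false]
      rw [ih (s + 1) hwt, hidx]
      refine congrArg _ (Prod.ext ?_ rfl)
      push_cast; ring

theorem pvFind_enumerate_none (l : List String) (w : String) :
    ∀ s : Int, w ∉ l →
      (PySem.List.enumerate l s).find? (fun p => p.2 == w) = none := by
  induction l with
  | nil => intro s _; rfl
  | cons x t ih =>
    intro s hw
    rw [PySem.List.enumerate_cons, List.find?_cons]
    have hx : (x == w) = false := by simp; intro he; exact hw (he ▸ List.mem_cons_self)
    rw [hx]
    simp only [cond_false]
    exact ih (s + 1) (fun h => hw (List.mem_cons_of_mem _ h))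

theorem pvFirst_get? (l : List String) (w : String) :
    (pvFirst l).get? w = if w ∈ l then some ((l.idxOf w : Int)) else none := by
  unfold pvFirst
  rw [pvRevFold_get]
  by_cases hw : w ∈ l
  · rw [pvFind_enumerate l w 0 hw]
    simp [hw]
  · rw [pvFind_enumerate_none l w 0 hw]
    simp [hw, PySem.Dict.get?_empty]

theorem pvFirst_keys_nodup (l : List String) : (pvFirst l).keys.Nodup := by
  unfold pvFirst
  exact PySem.Dict.nodup_keys_foldl_insert_key ((PySem.List.enumerate l 0).reverse) (fun p : Int × String => p.2) (fun _ p => p.1) PySem.Dict.empty (by simp)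

theorem pvFirst_mem_keys (l : List String) (w : String) : w ∈ (pvFirst l).keys ↔ w ∈ l := by
  rw [← PySem.Dict.contains_iff_mem_keys, PySem.Dict.contains_eq_isSome_get?, pvFirst_get?]
  by_cases hw : w ∈ l <;> simp [hw]

theorem pvFirst_getD (l : List String) (w : String) (hw : w ∈ l) :
    (pvFirst l).getD w 0 = (l.idxOf w : Int) := by
  rw [PySem.Dict.getD_eq_get?_getD, pvFirst_get?, if_pos hw]
  rfl

-- Sorting the unique words by first-occurrence index recovers first-occurrence order.
theorem pvSorted_keys (l : List String) :
    PySem.List.sorted (pvFirst l).keys (fun w => (pvFirst l).getD w 0) false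
      = PySem.List.dedup l := by
  refine PySem.List.sorted_eq_of_perm_of_pairwise_lt _ _ _ ?_ ?_
  · refine (List.perm_ext_iff_of_nodup (PySem.List.nodup_dedup l) (pvFirst_keys_nodup l)).2 ?_
    intro a
    rw [pvFirst_mem_keys, PySem.List.mem_dedup]
  · refine List.Pairwise.imp_of_mem ?_ (pvDedup_pairwise l)
    intro a b hA hB hab
    have ha : a ∈ l := (PySem.List.mem_dedup _ _).1 hA
    have hb : b ∈ l := (PySem.List.mem_dedup _ _).1 hB
    rw [pvFirst_getD l a ha, pvFirst_getD l b hb]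
    exact_mod_cast hab

-- ===== VERDICT (by name: the statement is the Claim_ definition above) =====
theorem create_feature_space_spec : Claim_equal_create_feature_space := by
  intro list _
  show create_feature_space list = create_feature_space_alt list
  have hB : create_feature_space_alt list
      = (PySem.List.enumerate
          (PySem.List.sorted (pvFirst list).keys (fun w => (pvFirst list).getD w 0) false) 0).map
          (fun p => (p.2, p.1)) := rfl
  rw [hB, pvSorted_keys]
  unfold create_feature_space
  rw [pvLoop_items list PySem.Dict.empty 0 (by simp)]
  simp [pvFresh_nil_eq_dedup, PySem.Dict.empty]
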